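-- pv_equiv track=rewrite | github.com/chdd/Commonsense-Generation-Framework-for-Knowledge-Graph-Embedding | codes/generate_concept.py | get_final_rel2dom
-- ===== SOURCE A (Python) =====
-- def get_final_rel2dom(rel2dom_h, rel2dom_t, result_236, result_237, rel_num):
--     rel2dom_h_final = {}
--     rel2dom_t_final = {}
--     for i in range(0, rel_num):
--         for son_list in result_236:
--             if i in son_list:
--                 rel2dom_h_final[i] = son_list
--             else:
--                 continue
--         for son_t_list in result_237:
--             if i + rel_num in son_t_list:
--                 rel2dom_t_final[i] = son_t_list
--             else:
--                 continue
--     return rel2dom_h_final, rel2dom_t_final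
-- ===== SOURCE B (Python) =====
-- def get_final_rel2dom(rel2dom_h, rel2dom_t, result_236, result_237, rel_num):
--     # One pass over the lists: scatter each list onto the relation indices it
--     # contains (later lists overwrite earlier ones, matching A's last-match-wins),
--     # then emit the entries in increasing index order.
--     head_of = {}
--     for son_list in result_236:
--         for e in son_list:
--             if 0 <= e < rel_num:
--                 head_of[e] = son_list
--     tail_of = {}
--     for son_t_list in result_237:
--         for e in son_t_list:
--             if rel_num <= e < 2 * rel_num:
--                 tail_of[e] = son_t_list
--     rel2dom_h_final = {i: head_of[i] for i in range(rel_num) if i in head_of}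
--     rel2dom_t_final = {i: tail_of[i + rel_num] for i in range(rel_num) if i + rel_num in tail_of}
--     return rel2dom_h_final, rel2dom_t_final
-- ===== Notes on version B (the rewrite author's own statement) =====
-- stated objective: faster
-- what changed: Replaces the per-index rescans of all lists (rel_num * total scans) by a single scatter pass over the lists into element-keyed dicts plus one ordered emission pass.
import Mathlib
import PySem

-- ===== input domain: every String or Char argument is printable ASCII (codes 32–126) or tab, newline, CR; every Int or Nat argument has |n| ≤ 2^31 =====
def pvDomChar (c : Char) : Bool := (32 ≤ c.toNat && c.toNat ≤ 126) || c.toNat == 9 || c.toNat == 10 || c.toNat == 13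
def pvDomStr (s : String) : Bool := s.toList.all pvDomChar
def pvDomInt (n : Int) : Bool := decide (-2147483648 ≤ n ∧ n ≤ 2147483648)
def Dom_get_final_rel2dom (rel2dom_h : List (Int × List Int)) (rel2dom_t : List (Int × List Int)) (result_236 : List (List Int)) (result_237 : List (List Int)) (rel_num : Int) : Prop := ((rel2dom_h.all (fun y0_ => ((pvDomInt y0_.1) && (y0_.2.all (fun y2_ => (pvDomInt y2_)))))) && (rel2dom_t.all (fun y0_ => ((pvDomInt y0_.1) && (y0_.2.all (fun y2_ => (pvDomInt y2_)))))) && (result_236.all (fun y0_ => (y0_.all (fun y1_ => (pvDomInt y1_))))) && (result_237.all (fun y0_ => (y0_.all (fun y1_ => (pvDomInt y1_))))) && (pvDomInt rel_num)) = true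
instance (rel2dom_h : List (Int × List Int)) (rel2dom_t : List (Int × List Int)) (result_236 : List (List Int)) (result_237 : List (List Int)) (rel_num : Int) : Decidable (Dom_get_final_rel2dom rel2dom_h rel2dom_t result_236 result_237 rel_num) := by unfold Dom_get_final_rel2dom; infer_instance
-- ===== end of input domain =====

-- B replaces A's per-index rescans of all lists by one scatter pass over the lists
-- plus an ordered emission pass (objective: faster).
-- ===== PORT A =====
def get_final_rel2dom (rel2dom_h : List (Int × List Int)) (rel2dom_t : List (Int × List Int)) (result_236 : List (List Int)) (result_237 : List (List Int)) (rel_num : Int) : (List (Int × List Int)) × (List (Int × List Int)) :=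
  let st := (PySem.List.pyRange 0 rel_num 1).foldl
    (fun (st : PySem.Dict Int (List Int) × PySem.Dict Int (List Int)) i =>
      let h := result_236.foldl
        (fun d son_list => if i ∈ son_list then d.insert i son_list else d) st.1
      let t := result_237.foldl
        (fun d son_t_list => if i + rel_num ∈ son_t_list then d.insert i son_t_list else d) st.2
      (h, t))
    (PySem.Dict.empty, PySem.Dict.empty)
  (st.1.items, st.2.items)

-- ===== PORT B =====
def get_final_rel2dom_alt (rel2dom_h : List (Int × List Int)) (rel2dom_t : List (Int × List Int)) (result_236 : List (List Int)) (result_237 : List (List Int)) (rel_num : Int) : (List (Int × List Int)) × (List (Int × List Int)) :=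
  let head_of := result_236.foldl
    (fun d son_list => son_list.foldl
      (fun d e => if 0 ≤ e ∧ e < rel_num then d.insert e son_list else d) d)
    (PySem.Dict.empty : PySem.Dict Int (List Int))
  let tail_of := result_237.foldl
    (fun d son_t_list => son_t_list.foldl
      (fun d e => if rel_num ≤ e ∧ e < 2 * rel_num then d.insert e son_t_list else d) d)
    (PySem.Dict.empty : PySem.Dict Int (List Int))
  -- dict comprehensions over range(rel_num): `head_of[i]` guarded by `i in head_of` is get?
  let hfin := (PySem.List.pyRange 0 rel_num 1).foldl
    (fun (d : PySem.Dict Int (List Int)) i =>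
      match head_of.get? i with | some l => d.insert i l | none => d) PySem.Dict.empty
  let tfin := (PySem.List.pyRange 0 rel_num 1).foldl
    (fun (d : PySem.Dict Int (List Int)) i =>
      match tail_of.get? (i + rel_num) with | some l => d.insert i l | none => d) PySem.Dict.empty
  (hfin.items, tfin.items)

-- ===== PRECONDITION & SPEC =====
def Spec_get_final_rel2dom (rel2dom_h : List (Int × List Int)) (rel2dom_t : List (Int × List Int)) (result_236 : List (List Int)) (result_237 : List (List Int)) (rel_num : Int) (out : (List (Int × List Int)) × (List (Int × List Int))) : Prop := out = get_final_rel2dom_alt rel2dom_h rel2dom_t result_236 result_237 rel_num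
instance (rel2dom_h : List (Int × List Int)) (rel2dom_t : List (Int × List Int)) (result_236 : List (List Int)) (result_237 : List (List Int)) (rel_num : Int) (out : (List (Int × List Int)) × (List (Int × List Int))) : Decidable (Spec_get_final_rel2dom rel2dom_h rel2dom_t result_236 result_237 rel_num out) := by unfold Spec_get_final_rel2dom; infer_instance

-- ===== CLAIM (what is proved, stated in full; the proofs are below) =====
def Claim_equal_get_final_rel2dom : Prop := ∀ (rel2dom_h : List (Int × List Int)) (rel2dom_t : List (Int × List Int)) (result_236 : List (List Int)) (result_237 : List (List Int)) (rel_num : Int), Dom_get_final_rel2dom rel2dom_h rel2dom_t result_236 result_237 rel_num → Spec_get_final_rel2dom rel2dom_h rel2dom_t result_236 result_237 rel_num (get_final_rel2dom rel2dom_h rel2dom_t result_236 result_237 rel_num)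

-- ===== LEMMAS AND PROOFS =====

-- last list of `lists` containing x (none if no list does)
def lastW (lists : List (List Int)) (x : Int) : Option (List Int) :=
  lists.foldl (fun acc l => if x ∈ l then some l else acc) none

theorem lastW_foldl (x : Int) (rest : List (List Int)) (acc : Option (List Int)) :
    rest.foldl (fun acc l => if x ∈ l then some l else acc) acc =
      match lastW rest x with | none => acc | some l => some l := by
  induction rest generalizing acc with
  | nil => rfl
  | cons m ms ih =>
    simp only [lastW, List.foldl_cons] at *
    rcases hms : ms.foldl (fun acc l => if x ∈ l then some l else acc) none with _ | l <;>
      by_cases hm : x ∈ m <;> simp only [hm, if_true, if_false] <;>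
        rw [ih] <;> simp [hms]

theorem lastW_cons (l : List Int) (rest : List (List Int)) (x : Int) :
    lastW (l :: rest) x =
      match lastW rest x with
      | some m => some m
      | none => if x ∈ l then some l else none := by
  show List.foldl _ _ (l :: rest) = _
  rw [List.foldl_cons, lastW_foldl]
  rcases lastW rest x with _ | m <;> by_cases hl : x ∈ l <;> simp [hl]

-- A's inner loop over the lists for a fixed key k / element x
theorem aInner (lists : List (List Int)) (x k : Int) (d : PySem.Dict Int (List Int)) :
    lists.foldl (fun d l => if x ∈ l then d.insert k l else d) d =
      match lastW lists x with | none => d | some l => d.insert k l := by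
  induction lists generalizing d with
  | nil => rfl
  | cons l rest ih =>
    rw [List.foldl_cons, lastW_cons]
    by_cases hl : x ∈ l
    · simp only [hl, if_true]
      rw [ih]
      rcases lastW rest x with _ | m <;> simp [PySem.Dict.insert_insert_self]
    · simp only [hl, if_false]
      rw [ih]
      rcases lastW rest x with _ | m <;> simp

-- a fold over fresh distinct keys that optionally inserts appends its entries
theorem foldFresh (r : List Int) (f : Int → Option (List Int))
    (d : PySem.Dict Int (List Int))
    (hfresh : ∀ i ∈ r, d.contains i = false) (hnd : r.Nodup) :
    (r.foldl (fun d i => match f i with | some l => d.insert i l | none => d) d).items =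
      d.items ++ r.filterMap (fun i => (f i).map (fun l => (i, l))) := by
  induction r generalizing d with
  | nil => simp
  | cons i rest ih =>
    simp only [List.foldl_cons, List.filterMap_cons]
    have hdi : d.contains i = false := hfresh i (by simp)
    have hnd' : rest.Nodup := (List.nodup_cons.mp hnd).2
    have hni : i ∉ rest := (List.nodup_cons.mp hnd).1
    cases hf : f i with
    | none =>
      rw [ih d (fun j hj => hfresh j (by simp [hj])) hnd']
      simp
    | some l =>
      have hfresh' : ∀ j ∈ rest, (d.insert i l).contains j = false := by
        intro j hj
        rw [PySem.Dict.contains_insert]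
        have : d.contains j = false := hfresh j (by simp [hj])
        have hji : j ≠ i := fun h => hni (h ▸ hj)
        simp [this, hji]
      rw [ih (d.insert i l) hfresh' hnd',
        PySem.Dict.items_insert_of_not_contains _ _ hdi]
      simp

-- B's inner scatter loop over one list: effect on a single lookup
theorem bInner (l : List Int) (P : Int → Prop) [DecidablePred P] (v : List Int)
    (d : PySem.Dict Int (List Int)) (x : Int) :
    (l.foldl (fun d e => if P e then d.insert e v else d) d).get? x =
      if x ∈ l ∧ P x then some v else d.get? x := by
  induction l generalizing d with
  | nil => simp
  | cons e rest ih =>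
    rw [List.foldl_cons, ih]
    by_cases hr : x ∈ rest ∧ P x
    · rw [if_pos hr, if_pos ⟨List.mem_cons_of_mem _ hr.1, hr.2⟩]
    · rw [if_neg hr]
      by_cases he : e = x
      · subst he
        by_cases hp : P e
        · rw [if_pos hp, PySem.Dict.get?_insert_self, if_pos ⟨by simp, hp⟩]
        · have hmem : ¬ (e ∈ e :: rest ∧ P e) := fun h => hp h.2
          rw [if_neg hp, if_neg hmem]
      · have hmem : ¬ (x ∈ e :: rest ∧ P x) := by
          rintro ⟨hm, hpx⟩
          rcases List.mem_cons.mp hm with h | h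
          · exact he h.symm
          · exact hr ⟨h, hpx⟩
        by_cases hp : P e
        · rw [if_pos hp, PySem.Dict.get?_insert_of_ne _ _ (fun h => he h.symm), if_neg hmem]
        · rw [if_neg hp, if_neg hmem]

-- B's whole scatter over all lists: lookup is the last containing list (when P x)
theorem bScatter (lists : List (List Int)) (P : Int → Prop) [DecidablePred P]
    (d : PySem.Dict Int (List Int)) (x : Int) (hx : P x) :
    (lists.foldl (fun d l => l.foldl (fun d e => if P e then d.insert e l else d) d) d).get? x =
      match lastW lists x with | some l => some l | none => d.get? x := by
  induction lists generalizing d with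
  | nil => rfl
  | cons l rest ih =>
    rw [List.foldl_cons, ih, lastW_cons]
    cases hr : lastW rest x with
    | some m => simp
    | none =>
      simp only
      rw [bInner l P l d x]
      by_cases hl : x ∈ l <;> simp [hl, hx]

-- the pair fold splits into two independent folds
theorem pairFold (r : List Int) (g1 g2 : PySem.Dict Int (List Int) → Int → PySem.Dict Int (List Int))
    (d1 d2 : PySem.Dict Int (List Int)) :
    r.foldl (fun (st : PySem.Dict Int (List Int) × PySem.Dict Int (List Int)) i =>
        (g1 st.1 i, g2 st.2 i)) (d1, d2) =
      (r.foldl g1 d1, r.foldl g2 d2) := by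
  induction r generalizing d1 d2 with
  | nil => rfl
  | cons i rest ih => simp [List.foldl_cons, ih]

theorem filterMapCongr (r : List Int) (f g : Int → Option ((Int × List Int)))
    (h : ∀ i ∈ r, f i = g i) : r.filterMap f = r.filterMap g := by
  induction r with
  | nil => rfl
  | cons i rest ih =>
    rw [List.filterMap_cons, List.filterMap_cons, h i (by simp),
      ih (fun j hj => h j (by simp [hj]))]

theorem mainEq (rel2dom_h rel2dom_t : List (Int × List Int))
    (result_236 result_237 : List (List Int)) (rel_num : Int) :
    get_final_rel2dom rel2dom_h rel2dom_t result_236 result_237 rel_num =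
      get_final_rel2dom_alt rel2dom_h rel2dom_t result_236 result_237 rel_num := by
  unfold get_final_rel2dom get_final_rel2dom_alt
  simp only
  rw [pairFold (PySem.List.pyRange 0 rel_num 1)
        (fun d i => result_236.foldl (fun d son_list => if i ∈ son_list then d.insert i son_list else d) d)
        (fun d i => result_237.foldl (fun d son_t_list => if i + rel_num ∈ son_t_list then d.insert i son_t_list else d) d)
        PySem.Dict.empty PySem.Dict.empty]
  have h1 : (fun (d : PySem.Dict Int (List Int)) (i : Int) =>
        result_236.foldl (fun d son_list => if i ∈ son_list then d.insert i son_list else d) d)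
      = fun d i => match lastW result_236 i with | some l => d.insert i l | none => d := by
    funext d i
    rw [aInner result_236 i i d]
    rcases lastW result_236 i <;> rfl
  have h2 : (fun (d : PySem.Dict Int (List Int)) (i : Int) =>
        result_237.foldl (fun d son_t_list => if i + rel_num ∈ son_t_list then d.insert i son_t_list else d) d)
      = fun d i => match lastW result_237 (i + rel_num) with | some l => d.insert i l | none => d := by
    funext d i
    rw [aInner result_237 (i + rel_num) i d]
    rcases lastW result_237 (i + rel_num) <;> rfl
  rw [h1, h2]
  refine Prod.ext ?_ ?_
  · rw [foldFresh (PySem.List.pyRange 0 rel_num 1) (fun i => lastW result_236 i)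
          PySem.Dict.empty (by simp [PySem.Dict.contains_empty]) (PySem.List.nodup_pyRange_one 0 rel_num),
        foldFresh (PySem.List.pyRange 0 rel_num 1)
          (fun i => (result_236.foldl (fun d son_list => son_list.foldl
            (fun d e => if 0 ≤ e ∧ e < rel_num then d.insert e son_list else d) d)
            (PySem.Dict.empty : PySem.Dict Int (List Int))).get? i)
          PySem.Dict.empty (by simp [PySem.Dict.contains_empty]) (PySem.List.nodup_pyRange_one 0 rel_num)]
    simp only [show (PySem.Dict.empty : PySem.Dict Int (List Int)).items = [] from rfl,
      List.nil_append]
    apply filterMapCongr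
    intro i hi
    have hx : (0 : Int) ≤ i ∧ i < rel_num := PySem.List.mem_pyRange_one.mp hi
    rw [bScatter result_236 (fun e => 0 ≤ e ∧ e < rel_num) PySem.Dict.empty i hx]
    rcases lastW result_236 i <;> simp [PySem.Dict.get?_empty]
  · rw [foldFresh (PySem.List.pyRange 0 rel_num 1) (fun i => lastW result_237 (i + rel_num))
          PySem.Dict.empty (by simp [PySem.Dict.contains_empty]) (PySem.List.nodup_pyRange_one 0 rel_num),
        foldFresh (PySem.List.pyRange 0 rel_num 1)
          (fun i => (result_237.foldl (fun d son_t_list => son_t_list.foldl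
            (fun d e => if rel_num ≤ e ∧ e < 2 * rel_num then d.insert e son_t_list else d) d)
            (PySem.Dict.empty : PySem.Dict Int (List Int))).get? (i + rel_num))
          PySem.Dict.empty (by simp [PySem.Dict.contains_empty]) (PySem.List.nodup_pyRange_one 0 rel_num)]
    simp only [show (PySem.Dict.empty : PySem.Dict Int (List Int)).items = [] from rfl,
      List.nil_append]
    apply filterMapCongr
    intro i hi
    have hi' : (0 : Int) ≤ i ∧ i < rel_num := PySem.List.mem_pyRange_one.mp hi
    have hx : rel_num ≤ i + rel_num ∧ i + rel_num < 2 * rel_num := by omega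
    rw [bScatter result_237 (fun e => rel_num ≤ e ∧ e < 2 * rel_num) PySem.Dict.empty (i + rel_num) hx]
    rcases lastW result_237 (i + rel_num) <;> simp [PySem.Dict.get?_empty]

-- ===== VERDICT (by name: the statement is the Claim_ definition above) =====
theorem get_final_rel2dom_spec : Claim_equal_get_final_rel2dom := by
  intro rel2dom_h rel2dom_t result_236 result_237 rel_num _
  unfold Spec_get_final_rel2dom
  exact mainEq rel2dom_h rel2dom_t result_236 result_237 rel_num
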